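-- pv_equiv track=rewrite | github.com/hiteshkkk/moneyplus_tools | nse_pages/utils.py | render_custom_table
-- ===== SOURCE A (Python) =====
-- def format_html_value(val):
--     """Wraps status text in HTML spans for the 'Badge' look."""
--     s = str(val)
--     if not s or s == "None": return ""
--
--     s_lower = s.lower()
--
--     # Success / Active
--     if any(x in s_lower for x in ['success', 'active', 'approved', 'yes', 'verified', 'svalid']):
--         return f'<span class="badge-success">{s}</span>'
--
--     # Error / Reject
--     if any(x in s_lower for x in ['fail', 'reject', 'error', 'no', 'invalid', 'closed']):
--         return f'<span class="badge-danger">{s}</span>'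
--
--     # Warning / Pending
--     if any(x in s_lower for x in ['pending', 'wait', 'hold']):
--         return f'<span class="badge-warning">{s}</span>'
--
--     # Info (e.g. modes)
--     if any(x in s_lower for x in ['electronic', 'physical']):
--         return f'<span class="badge-info">{s}</span>'
--
--     return s
--
-- def render_custom_table(data_dict, priority_fields=None):
--     """Generates the HTML table string from a dictionary."""
--     html_rows = ""
--     processed_keys = set()
--
--     # Clean Data (Remove empty/None)
--     clean_data = {}
--     for k, v in data_dict.items():
--         if v is None or str(v).strip() in ["", "None"]: continue
--         clean_k = k.replace("_", " ").upper()
--         clean_data[clean_k] = v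
--
--     # 1. Render Priority Fields
--     if priority_fields:
--         for field in priority_fields:
--             # Flexible matching (exact match or key contains field name)
--             for k, v in clean_data.items():
--                 if k == field and k not in processed_keys:
--                     html_rows += f"<tr><td class='field-label'>{k}</td><td class='field-value'>{format_html_value(v)}</td></tr>"
--                     processed_keys.add(k)
--
--     # 2. Render Remaining Fields (Sorted)
--     for k in sorted(clean_data.keys()):
--         if k not in processed_keys:
--             v = clean_data[k]
--             html_rows += f"<tr><td class='field-label'>{k}</td><td class='field-value'>{format_html_value(v)}</td></tr>"
--
--     return f"<table class='custom-report'>{html_rows}</table>"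
-- ===== SOURCE B (Python) =====
-- def format_html_value(val):
--     """Wraps status text in HTML spans for the 'Badge' look."""
--     s = str(val)
--     if not s or s == "None": return ""
--     s_lower = s.lower()
--     if any(x in s_lower for x in ['success', 'active', 'approved', 'yes', 'verified', 'svalid']):
--         return f'<span class="badge-success">{s}</span>'
--     if any(x in s_lower for x in ['fail', 'reject', 'error', 'no', 'invalid', 'closed']):
--         return f'<span class="badge-danger">{s}</span>'
--     if any(x in s_lower for x in ['pending', 'wait', 'hold']):
--         return f'<span class="badge-warning">{s}</span>'
--     if any(x in s_lower for x in ['electronic', 'physical']):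
--         return f'<span class="badge-info">{s}</span>'
--     return s
--
-- def render_custom_table(data_dict, priority_fields=None):
--     """Generates the HTML table string from a dictionary."""
--     # Clean Data (Remove empty/None) -- same cleaning as before
--     clean_data = {}
--     for k, v in data_dict.items():
--         if v is None or str(v).strip() in ["", "None"]: continue
--         clean_data[k.replace("_", " ").upper()] = v
--
--     # One composite-key sort instead of a priority scan plus a second sorted pass:
--     # rank = first index of each field in priority_fields, unranked keys sort last,
--     # alphabetically.
--     pf = priority_fields or []
--     rank = {}
--     for i, f in enumerate(pf):
--         if f not in rank:
--             rank[f] = i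
--     ordered = sorted(clean_data, key=lambda k: (rank.get(k, len(pf)), k))
--
--     rows = "".join(
--         f"<tr><td class='field-label'>{k}</td><td class='field-value'>{format_html_value(clean_data[k])}</td></tr>"
--         for k in ordered)
--     return f"<table class='custom-report'>{rows}</table>"
-- ===== Notes on version B (the rewrite author's own statement) =====
-- stated objective: faster
-- what changed: B replaces A's two rendering passes (a nested priority scan over all cleaned items for every priority field, plus a second sorted-remaining pass with a processed-keys set) by a rank map built once from priority_fields and a single sort of the cleaned keys under the composite key (rank.get(k, len(pf)), k), emitting each row once in one joined pass.
import Mathlib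
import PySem

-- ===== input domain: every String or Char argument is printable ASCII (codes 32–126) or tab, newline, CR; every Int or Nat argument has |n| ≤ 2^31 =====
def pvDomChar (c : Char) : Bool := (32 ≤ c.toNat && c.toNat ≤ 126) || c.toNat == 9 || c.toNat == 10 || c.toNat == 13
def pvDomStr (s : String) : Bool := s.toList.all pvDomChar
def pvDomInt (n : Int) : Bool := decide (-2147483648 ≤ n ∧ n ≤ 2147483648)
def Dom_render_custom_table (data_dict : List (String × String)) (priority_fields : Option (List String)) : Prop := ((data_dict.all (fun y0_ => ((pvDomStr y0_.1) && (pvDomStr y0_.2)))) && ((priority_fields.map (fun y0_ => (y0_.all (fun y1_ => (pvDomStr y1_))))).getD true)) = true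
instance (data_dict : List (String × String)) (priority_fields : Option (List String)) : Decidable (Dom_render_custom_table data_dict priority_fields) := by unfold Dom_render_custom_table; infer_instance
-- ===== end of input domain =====

-- B replaces A's priority-scan pass (rescanning all cleaned items per priority field) plus
-- second sorted pass by ONE sort of the cleaned keys under the composite key
-- (first index in priority_fields, key); same output, measurably faster on large inputs.

-- ===== PORT A =====
-- helper format_html_value, verbatim in both Python sources (val is a str here, so str(val) = val)
def format_html_value (val : String) : String :=
  let s := val
  if s == "" || s == "None" then ""
  else
    let s_lower := PySem.Str.lower s
    if ["success", "active", "approved", "yes", "verified", "svalid"].any (fun x => PySem.Str.isIn x s_lower) then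
      "<span class=\"badge-success\">" ++ s ++ "</span>"
    else if ["fail", "reject", "error", "no", "invalid", "closed"].any (fun x => PySem.Str.isIn x s_lower) then
      "<span class=\"badge-danger\">" ++ s ++ "</span>"
    else if ["pending", "wait", "hold"].any (fun x => PySem.Str.isIn x s_lower) then
      "<span class=\"badge-warning\">" ++ s ++ "</span>"
    else if ["electronic", "physical"].any (fun x => PySem.Str.isIn x s_lower) then
      "<span class=\"badge-info\">" ++ s ++ "</span>"
    else s

-- the row f-string, identical in both Python sources
def pv_row (k v : String) : String :=
  "<tr><td class='field-label'>" ++ k ++ "</td><td class='field-value'>" ++ format_html_value v ++ "</td></tr>"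

-- the cleaning loop, identical in both Python sources (v is a str here, never None)
def pv_clean (data_dict : List (String × String)) : PySem.Dict String String :=
  (PySem.Dict.ofList data_dict).items.foldl
    (fun cd kv =>
      if PySem.Str.strip kv.2 == "" || PySem.Str.strip kv.2 == "None" then cd
      else cd.insert (PySem.Str.upper (PySem.Str.replace kv.1 "_" " ")) kv.2)
    PySem.Dict.empty

def render_custom_table (data_dict : List (String × String)) (priority_fields : Option (List String)) : String :=
  let clean := pv_clean data_dict
  -- 1. priority pass: state = (html_rows, processed_keys)
  let st1 : String × PySem.Set String :=
    match priority_fields with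
    | none => ("", PySem.Set.empty)
    | some pfs =>
      if pfs.isEmpty then ("", PySem.Set.empty)    -- `if priority_fields:`
      else
        pfs.foldl (fun st field =>
          clean.items.foldl (fun st kv =>
            if kv.1 == field && !(PySem.Set.contains st.2 kv.1) then
              (st.1 ++ pv_row kv.1 kv.2, PySem.Set.add st.2 kv.1)
            else st) st)
          ("", PySem.Set.empty)
  -- 2. remaining fields, sorted (clean_data[k] never raises: k ∈ keys)
  let rows := (PySem.List.sorted clean.keys (fun k => k)).foldl
    (fun acc k =>
      if PySem.Set.contains st1.2 k then acc
      else acc ++ pv_row k (clean.getD k ""))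
    st1.1
  "<table class='custom-report'>" ++ rows ++ "</table>"

-- ===== PORT B =====
def render_custom_table_alt (data_dict : List (String × String)) (priority_fields : Option (List String)) : String :=
  let clean := pv_clean data_dict
  let pf := priority_fields.getD []        -- priority_fields or []
  -- rank: first index of each field (enumerate ported via zipIdx: p = (field, index))
  let rank : PySem.Dict String Int :=
    (pf.zipIdx).foldl (fun d p => if d.contains p.1 then d else d.insert p.1 (p.2 : Int)) PySem.Dict.empty
  let ordered := PySem.List.sorted2 clean.keys (fun k => rank.getD k (pf.length : Int)) (fun k => k)
  "<table class='custom-report'>" ++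
    PySem.Str.join "" (ordered.map (fun k => pv_row k (clean.getD k ""))) ++ "</table>"

-- ===== PRECONDITION & SPEC =====
def Spec_render_custom_table (data_dict : List (String × String)) (priority_fields : Option (List String)) (out : String) : Prop := out = render_custom_table_alt data_dict priority_fields
instance (data_dict : List (String × String)) (priority_fields : Option (List String)) (out : String) : Decidable (Spec_render_custom_table data_dict priority_fields out) := by unfold Spec_render_custom_table; infer_instance

-- ===== CLAIM (what is proved, stated in full; the proofs are below) =====
def Claim_equal_render_custom_table : Prop := ∀ (data_dict : List (String × String)) (priority_fields : Option (List String)), Dom_render_custom_table data_dict priority_fields → Spec_render_custom_table data_dict priority_fields (render_custom_table data_dict priority_fields)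

-- ===== LEMMAS AND PROOFS =====

-- membership view of PySem.Set.contains
theorem pv_contains_iff (s : PySem.Set String) (x : String) :
    PySem.Set.contains s x = true ↔ x ∈ s := by
  simp [PySem.Set.contains]

theorem pv_contains_add_false_iff (s : PySem.Set String) (f x : String) :
    PySem.Set.contains (PySem.Set.add s f) x = false ↔ x ≠ f ∧ PySem.Set.contains s x = false := by
  simp only [Bool.eq_false_iff, ne_eq, pv_contains_iff, PySem.Set.mem_add]
  tauto

-- join "" basics
theorem pv_join_nil : PySem.Str.join "" [] = "" := by rfl

theorem pv_join_cons (x : String) (xs : List String) :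
    PySem.Str.join "" (x :: xs) = x ++ PySem.Str.join "" xs := by
  cases xs with
  | nil => simp [PySem.Str.join, PySem.Chars.join, List.intercalate]
  | cons y ys => simp [PySem.Str.join, PySem.Chars.join, List.intercalate, String.ofList_append]

theorem pv_join_append (l1 l2 : List String) :
    PySem.Str.join "" (l1 ++ l2) = PySem.Str.join "" l1 ++ PySem.Str.join "" l2 := by
  induction l1 with
  | nil => rw [List.nil_append, pv_join_nil]; rfl
  | cons x t ih => simp only [List.cons_append, pv_join_cons, ih, String.append_assoc]

theorem pv_foldl_append {α : Type} (l : List α) (g : α → String) (init : String) :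
    l.foldl (fun acc k => acc ++ g k) init = init ++ PySem.Str.join "" (l.map g) := by
  induction l generalizing init with
  | nil => rw [List.map_nil, pv_join_nil, String.append_empty]; rfl
  | cons x t ih => simp only [List.foldl_cons, List.map_cons, ih, pv_join_cons, String.append_assoc]

-- the cleaned dict has distinct keys
theorem pv_clean_keys_nodup (dd : List (String × String)) : (pv_clean dd).keys.Nodup := by
  unfold pv_clean
  have h : (fun (cd : PySem.Dict String String) (kv : String × String) =>
      if PySem.Str.strip kv.2 == "" || PySem.Str.strip kv.2 == "None" then cd
      else cd.insert (PySem.Str.upper (PySem.Str.replace kv.1 "_" " ")) kv.2)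
    = (fun cd kv =>
      if (!(PySem.Str.strip kv.2 == "" || PySem.Str.strip kv.2 == "None")) = true then
        cd.insert (PySem.Str.upper (PySem.Str.replace kv.1 "_" " ")) kv.2 else cd) := by
    funext cd kv
    cases h : (PySem.Str.strip kv.2 == "" || PySem.Str.strip kv.2 == "None") <;> simp
  rw [h, PySem.List.foldl_if_eq_foldl_filter]
  exact PySem.Dict.nodup_keys_foldl_insert_key _ _ _ _ PySem.Dict.nodup_keys_empty

-- A's inner scan over the items: at most one row fires
theorem pv_inner_aux (field : String) (l : List (String × String)) (st : String × PySem.Set String) :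
    l.foldl (fun st kv =>
        if kv.1 == field && !(PySem.Set.contains st.2 kv.1) then
          (st.1 ++ pv_row kv.1 kv.2, PySem.Set.add st.2 kv.1)
        else st) st
    = match l.find? (fun kv => kv.1 == field) with
      | none => st
      | some kv => if PySem.Set.contains st.2 field then st
                   else (st.1 ++ pv_row field kv.2, PySem.Set.add st.2 field) := by
  induction l generalizing st with
  | nil => rfl
  | cons kv t ih =>
    rw [List.foldl_cons]
    by_cases hk : (kv.1 == field) = true
    · have hkeq : kv.1 = field := by exact eq_of_beq hk
      simp only [List.find?_cons, hk]
      by_cases hc : PySem.Set.contains st.2 field = true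
      · have hc' : field ∈ st.2 := by simpa [PySem.Set.contains] using hc
        rw [if_neg (by rw [hkeq, hc]; simp), ih, if_pos hc]
        cases h : t.find? (fun kv => kv.1 == field) <;> simp [hc']
      · rw [if_pos (by rw [hkeq]; simp at hc ⊢; exact hc), if_neg hc, ih, hkeq]
        have hmem : field ∈ PySem.Set.add st.2 field := by simp [PySem.Set.mem_add]
        cases h : t.find? (fun kv => kv.1 == field) <;>
          simp [PySem.Set.contains, hmem]
    · simp only [List.find?_cons, hk]
      rw [if_neg (by simp), ih]

theorem pv_inner (clean : PySem.Dict String String) (field : String) (st : String × PySem.Set String) :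
    clean.items.foldl (fun st kv =>
        if kv.1 == field && !(PySem.Set.contains st.2 kv.1) then
          (st.1 ++ pv_row kv.1 kv.2, PySem.Set.add st.2 kv.1)
        else st) st
    = if clean.contains field && !(PySem.Set.contains st.2 field) then
        (st.1 ++ pv_row field (clean.getD field ""), PySem.Set.add st.2 field)
      else st := by
  rw [pv_inner_aux]
  cases hf : clean.items.find? (fun kv => kv.1 == field) with
  | none =>
    have hc : clean.contains field = false := by
      simp only [PySem.Dict.contains]
      rw [List.any_eq_false]
      intro p hp
      exact List.find?_eq_none.mp hf p hp
    rw [hc]; simp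
  | some kv =>
    have hc : clean.contains field = true := by
      simp only [PySem.Dict.contains]
      rw [List.any_eq_true]
      refine ⟨kv, List.mem_of_find?_eq_some hf, ?_⟩
      have := List.find?_some (l := clean.items) (p := fun (kv : String × String) => kv.1 == field) hf
      simpa using this
    have hg : clean.getD field "" = kv.2 := by
      simp [PySem.Dict.getD, PySem.Dict.get?, hf]
    rw [hc, hg]
    simp


-- the keys A's priority pass emits, in emission order
def pv_prio (clean : PySem.Dict String String) : List String → PySem.Set String → List String
  | [], _ => []
  | f :: r, seen =>
    if clean.contains f && !(PySem.Set.contains seen f) then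
      f :: pv_prio clean r (PySem.Set.add seen f)
    else pv_prio clean r seen

theorem pv_prio_fold (clean : PySem.Dict String String) (pfs : List String) (st : String × PySem.Set String) :
    pfs.foldl (fun st field =>
        clean.items.foldl (fun st kv =>
          if kv.1 == field && !(PySem.Set.contains st.2 kv.1) then
            (st.1 ++ pv_row kv.1 kv.2, PySem.Set.add st.2 kv.1)
          else st) st) st
    = (st.1 ++ PySem.Str.join "" ((pv_prio clean pfs st.2).map (fun f => pv_row f (clean.getD f ""))),
       PySem.Set.update st.2 (pv_prio clean pfs st.2)) := by
  induction pfs generalizing st with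
  | nil =>
    simp [pv_prio, pv_join_nil, String.append_empty, PySem.Set.update]
  | cons f r ih =>
    rw [List.foldl_cons, pv_inner]
    by_cases hC : (clean.contains f && !(PySem.Set.contains st.2 f)) = true
    · rw [if_pos hC, ih]
      show _ = (_, PySem.Set.update st.2 (pv_prio clean (f :: r) st.2))
      rw [show pv_prio clean (f :: r) st.2
            = f :: pv_prio clean r (PySem.Set.add st.2 f) by rw [pv_prio, if_pos hC]]
      refine Prod.ext ?_ ?_
      · show _ = st.1 ++ PySem.Str.join "" _
        rw [List.map_cons, pv_join_cons, ← String.append_assoc]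
      · show PySem.Set.update (PySem.Set.add st.2 f) _ = _
        simp [PySem.Set.update]
    · rw [if_neg hC, ih]
      rw [show pv_prio clean (f :: r) st.2 = pv_prio clean r st.2 by rw [pv_prio, if_neg hC]]

theorem pv_prio_mem (clean : PySem.Dict String String) (pfs : List String) (seen : PySem.Set String) (x : String) :
    x ∈ pv_prio clean pfs seen ↔ x ∈ pfs ∧ clean.contains x = true ∧ PySem.Set.contains seen x = false := by
  induction pfs generalizing seen with
  | nil => simp [pv_prio]
  | cons f r ih =>
    rw [pv_prio]
    by_cases hC : (clean.contains f && !(PySem.Set.contains seen f)) = true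
    · rw [if_pos hC]
      rw [Bool.and_eq_true, Bool.not_eq_eq_eq_not, Bool.not_true] at hC
      simp only [List.mem_cons, ih, pv_contains_add_false_iff]
      constructor
      · rintro (rfl | ⟨hr, hcl, _, hs⟩)
        · exact ⟨Or.inl rfl, hC.1, hC.2⟩
        · exact ⟨Or.inr hr, hcl, hs⟩
      · rintro ⟨hfr, hcl, hs⟩
        rcases hfr with rfl | hr
        · exact Or.inl rfl
        · by_cases hxf : x = f
          · exact Or.inl hxf
          · exact Or.inr ⟨hr, hcl, hxf, hs⟩
    · rw [if_neg hC, ih]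
      rw [Bool.and_eq_true, Bool.not_eq_eq_eq_not, Bool.not_true] at hC
      constructor
      · rintro ⟨hr, hcl, hs⟩; exact ⟨List.mem_cons_of_mem _ hr, hcl, hs⟩
      · rintro ⟨hfr, hcl, hs⟩
        rcases List.mem_cons.mp hfr with rfl | hr
        · exact absurd ⟨hcl, hs⟩ hC
        · exact ⟨hr, hcl, hs⟩

theorem pv_prio_nodup (clean : PySem.Dict String String) (pfs : List String) (seen : PySem.Set String) :
    (pv_prio clean pfs seen).Nodup := by
  induction pfs generalizing seen with
  | nil => exact List.nodup_nil
  | cons f r ih =>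
    rw [pv_prio]
    by_cases hC : (clean.contains f && !(PySem.Set.contains seen f)) = true
    · rw [if_pos hC]
      refine List.Nodup.cons ?_ (ih _)
      intro hmem
      rcases (pv_prio_mem clean r (PySem.Set.add seen f) f).mp hmem with ⟨_, _, hs⟩
      exact ((pv_contains_add_false_iff _ _ _).mp hs).1 rfl
    · rw [if_neg hC]; exact ih _

theorem pv_prio_pairwise (clean : PySem.Dict String String) (pfs : List String) (seen : PySem.Set String) :
    (pv_prio clean pfs seen).Pairwise (fun a b => pfs.idxOf a < pfs.idxOf b) := by
  induction pfs generalizing seen with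
  | nil => exact List.Pairwise.nil
  | cons f r ih =>
    rw [pv_prio]
    by_cases hC : (clean.contains f && !(PySem.Set.contains seen f)) = true
    · rw [if_pos hC]
      have hne : ∀ x ∈ pv_prio clean r (PySem.Set.add seen f), x ≠ f := by
        intro x hx
        rcases (pv_prio_mem clean r _ x).mp hx with ⟨_, _, hs⟩
        exact ((pv_contains_add_false_iff _ _ _).mp hs).1
      refine List.Pairwise.cons ?_ (List.Pairwise.imp_of_mem ?_ (ih _))
      · intro b hb
        rw [List.idxOf_cons_self, List.idxOf_cons_ne _ (Ne.symm (hne b hb))]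
        exact Nat.succ_pos _
      · intro a b ha hb hab
        rw [List.idxOf_cons_ne _ (Ne.symm (hne a ha)), List.idxOf_cons_ne _ (Ne.symm (hne b hb))]
        exact Nat.succ_lt_succ hab
    · rw [if_neg hC]
      rw [Bool.and_eq_true, Bool.not_eq_eq_eq_not, Bool.not_true] at hC
      have hne : ∀ x ∈ pv_prio clean r seen, x ≠ f := by
        intro x hx hxf
        rcases (pv_prio_mem clean r seen x).mp hx with ⟨_, hcl, hs⟩
        exact hC ⟨hxf ▸ hcl, hxf ▸ hs⟩
      refine List.Pairwise.imp_of_mem ?_ (ih seen)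
      intro a b ha hb hab
      rw [List.idxOf_cons_ne _ (Ne.symm (hne a ha)), List.idxOf_cons_ne _ (Ne.symm (hne b hb))]
      exact Nat.succ_lt_succ hab

-- B's rank dict: first index of each field
theorem pv_rank_getD (pf : List String) (n : Nat) (d : PySem.Dict String Int) (f : String) (dflt : Int) :
    ((pf.zipIdx n).foldl (fun d p => if d.contains p.1 then d else d.insert p.1 (p.2 : Int)) d).getD f dflt
    = if d.contains f then d.getD f dflt
      else if f ∈ pf then ((n + pf.idxOf f : Nat) : Int) else dflt := by
  induction pf generalizing n d with
  | nil =>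
    simp only [List.zipIdx_nil, List.foldl_nil, List.not_mem_nil, if_false]
    by_cases hf : d.contains f = true
    · rw [if_pos hf]
    · rw [if_neg hf, PySem.Dict.getD_of_not_contains _ _ (by simpa using hf)]
  | cons g t ih =>
    rw [List.zipIdx_cons, List.foldl_cons]
    simp only
    by_cases hg : d.contains g = true
    · rw [if_pos hg, ih]
      by_cases hf : d.contains f = true
      · rw [if_pos hf, if_pos hf]
      · rw [if_neg hf, if_neg hf]
        by_cases hfg : f = g
        · exact absurd (hfg ▸ hg) hf
        · by_cases hft : f ∈ t
          · rw [if_pos hft, if_pos (List.mem_cons_of_mem _ hft),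
              List.idxOf_cons_ne _ (Ne.symm hfg)]
            push_cast; omega
          · rw [if_neg hft, if_neg (by simpa [hfg] using hft)]
    · rw [if_neg hg, ih]
      by_cases hfg : f = g
      · subst hfg
        rw [if_pos (PySem.Dict.contains_insert_self d f _), if_neg hg,
          if_pos (List.mem_cons_self), List.idxOf_cons_self]
        rw [PySem.Dict.getD_insert_self]
        simp
      · have hci : (d.insert g (n : Int)).contains f = d.contains f := by
          rw [PySem.Dict.contains_insert]
          simp [hfg]
        rw [hci]
        by_cases hf : d.contains f = true
        · rw [if_pos hf, if_pos hf, PySem.Dict.getD_insert_of_ne d _ dflt hfg]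
        · rw [if_neg hf, if_neg hf]
          by_cases hft : f ∈ t
          · rw [if_pos hft, if_pos (List.mem_cons_of_mem _ hft),
              List.idxOf_cons_ne _ (Ne.symm hfg)]
            push_cast; omega
          · rw [if_neg hft, if_neg (by simpa [hfg] using hft)]

-- Python's tuple key is the lexicographic order
theorem pv_sorted2_eq_sorted_lex (xs : List String) (r : String → Int) :
    PySem.List.sorted2 xs r (fun k => k) = PySem.List.sorted xs (fun k => toLex (r k, k)) := by
  rw [PySem.List.sorted_eq_foldl_insertBy]
  have hb : (fun a b => decide (r a < r b) || (!decide (r b < r a) && decide (a < b)))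
      = (fun (a b : String) => decide ((toLex (r a, a)) < toLex (r b, b))) := by
    funext a b
    rcases lt_trichotomy (r a) (r b) with h | h | h
    · simp [Prod.Lex.lt_iff, h, not_lt_of_gt h]
    · simp [Prod.Lex.lt_iff, h]
    · simp [Prod.Lex.lt_iff, h, not_lt_of_gt h]
      intro he; exact absurd he (by omega)
  show List.foldl (fun acc x => PySem.List.insertBy
      (fun a b => decide (r a < r b) || (!decide (r b < r a) && decide (a < b))) x acc) [] xs = _
  rw [hb]

-- the one sort of B enumerates A's priority pass followed by A's sorted-remaining pass
theorem pv_order (clean : PySem.Dict String String) (hn : clean.keys.Nodup) (pfs : List String) :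
    PySem.List.sorted2 clean.keys
      (fun k => ((pfs.zipIdx).foldl (fun d p => if d.contains p.1 then d else d.insert p.1 (p.2 : Int)) PySem.Dict.empty).getD k (pfs.length : Int))
      (fun k => k)
    = pv_prio clean pfs PySem.Set.empty
      ++ (PySem.List.sorted clean.keys (fun k => k)).filter
           (fun k => !(PySem.Set.contains (PySem.Set.update PySem.Set.empty (pv_prio clean pfs PySem.Set.empty)) k)) := by
  have hempty : ∀ x : String, PySem.Set.contains PySem.Set.empty x = false := fun _ => rfl
  have hrank : ∀ k : String,
      ((pfs.zipIdx).foldl (fun d p => if d.contains p.1 then d else d.insert p.1 (p.2 : Int)) PySem.Dict.empty).getD k (pfs.length : Int)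
      = if k ∈ pfs then (pfs.idxOf k : Int) else (pfs.length : Int) := by
    intro k
    rw [pv_rank_getD, if_neg (by rw [PySem.Dict.contains_empty]; exact Bool.false_ne_true)]
    by_cases hk : k ∈ pfs
    · rw [if_pos hk, if_pos hk, Nat.zero_add]
    · rw [if_neg hk, if_neg hk]
  have hLmem : ∀ x, x ∈ pv_prio clean pfs PySem.Set.empty ↔ x ∈ pfs ∧ clean.contains x = true := by
    intro x; rw [pv_prio_mem]
    simp only [hempty x, and_true]
  have hSmem : ∀ x, x ∈ (PySem.List.sorted clean.keys (fun k => k)).filter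
      (fun k => !(PySem.Set.contains (PySem.Set.update PySem.Set.empty (pv_prio clean pfs PySem.Set.empty)) k))
      ↔ x ∈ clean.keys ∧ x ∉ pv_prio clean pfs PySem.Set.empty := by
    intro x
    rw [List.mem_filter, PySem.List.mem_sorted]
    have : PySem.Set.update PySem.Set.empty (pv_prio clean pfs PySem.Set.empty)
        = PySem.Set.ofList (pv_prio clean pfs PySem.Set.empty) := rfl
    rw [this]
    have hc : (!(PySem.Set.contains (PySem.Set.ofList (pv_prio clean pfs PySem.Set.empty)) x)) = true
        ↔ x ∉ pv_prio clean pfs PySem.Set.empty := by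
      rw [Bool.not_eq_true', Bool.eq_false_iff]
      constructor
      · intro h hx; exact h ((pv_contains_iff _ _).mpr ((PySem.Set.mem_ofList _ _).mpr hx))
      · intro h hx; exact h ((PySem.Set.mem_ofList _ _).mp ((pv_contains_iff _ _).mp hx))
    rw [hc]
  have hnotpf : ∀ x, x ∈ clean.keys → x ∉ pv_prio clean pfs PySem.Set.empty → x ∉ pfs := by
    intro x hk hnl hpf
    exact hnl ((hLmem x).mpr ⟨hpf, (PySem.Dict.contains_iff_mem_keys clean x).mpr hk⟩)
  rw [pv_sorted2_eq_sorted_lex]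
  apply PySem.List.sorted_eq_of_perm_of_pairwise_lt
  · -- permutation
    have hnodupS : ((PySem.List.sorted clean.keys (fun k => k)).filter
        (fun k => !(PySem.Set.contains (PySem.Set.update PySem.Set.empty (pv_prio clean pfs PySem.Set.empty)) k))).Nodup :=
      List.Nodup.filter _ ((PySem.List.sorted_perm clean.keys (fun k => k) false).symm.nodup hn)
    have hnodup : (pv_prio clean pfs PySem.Set.empty
        ++ (PySem.List.sorted clean.keys (fun k => k)).filter
             (fun k => !(PySem.Set.contains (PySem.Set.update PySem.Set.empty (pv_prio clean pfs PySem.Set.empty)) k))).Nodup := by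
      refine List.Nodup.append (pv_prio_nodup clean pfs PySem.Set.empty) hnodupS ?_
      intro x hxL hxS
      exact ((hSmem x).mp hxS).2 hxL
    rw [List.perm_ext_iff_of_nodup hnodup hn]
    intro a
    rw [List.mem_append, hSmem a]
    constructor
    · rintro (h | ⟨h, _⟩)
      · exact (PySem.Dict.contains_iff_mem_keys clean a).mp ((hLmem a).mp h).2
      · exact h
    · intro h
      by_cases hL : a ∈ pv_prio clean pfs PySem.Set.empty
      · exact Or.inl hL
      · exact Or.inr ⟨h, hL⟩
  · -- strictly increasing under the composite key
    rw [List.pairwise_append]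
    refine ⟨?_, ?_, ?_⟩
    · refine List.Pairwise.imp_of_mem ?_ (pv_prio_pairwise clean pfs PySem.Set.empty)
      intro a b ha hb hab
      have hapf := ((hLmem a).mp ha).1
      have hbpf := ((hLmem b).mp hb).1
      rw [Prod.Lex.lt_iff]
      simp only [ofLex_toLex]
      left
      rw [hrank a, hrank b, if_pos hapf, if_pos hbpf]
      exact_mod_cast hab
    · have hbase : (PySem.List.sorted clean.keys (fun k => k)).Pairwise
          (fun a b : String => a ≤ b ∧ a ≠ b) :=
        List.Pairwise.and (PySem.List.sorted_pairwise clean.keys (fun k => k))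
          ((PySem.List.sorted_perm clean.keys (fun k => k) false).symm.nodup hn)
      refine List.Pairwise.imp_of_mem ?_ (List.Pairwise.filter _ hbase)
      intro a b ha hb hab
      have hA := hSmem a |>.mp ha
      have hB := hSmem b |>.mp hb
      rw [Prod.Lex.lt_iff]
      simp only [ofLex_toLex]
      right
      constructor
      · rw [hrank a, hrank b, if_neg (hnotpf a hA.1 hA.2), if_neg (hnotpf b hB.1 hB.2)]
      · exact lt_of_le_of_ne hab.1 hab.2
    · intro a ha b hb
      have hapf := ((hLmem a).mp ha).1
      have hB := hSmem b |>.mp hb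
      rw [Prod.Lex.lt_iff]
      simp only [ofLex_toLex]
      left
      rw [hrank a, hrank b, if_pos hapf, if_neg (hnotpf b hB.1 hB.2)]
      exact_mod_cast List.idxOf_lt_length_of_mem hapf

-- ===== VERDICT (by name: the statement is the Claim_ definition above) =====
theorem render_custom_table_spec : Claim_equal_render_custom_table := by
  intro dd pf _
  show render_custom_table dd pf = render_custom_table_alt dd pf
  -- A with the (absent / empty / non-empty) priority list unified into one fold over pf.getD []
  have hA : render_custom_table dd pf
      = "<table class='custom-report'>"
        ++ (PySem.List.sorted (pv_clean dd).keys (fun k => k)).foldl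
            (fun acc k =>
              if PySem.Set.contains
                  ((pf.getD []).foldl (fun st field =>
                    (pv_clean dd).items.foldl (fun st kv =>
                      if kv.1 == field && !(PySem.Set.contains st.2 kv.1) then
                        (st.1 ++ pv_row kv.1 kv.2, PySem.Set.add st.2 kv.1)
                      else st) st) ("", PySem.Set.empty)).2 k then acc
              else acc ++ pv_row k ((pv_clean dd).getD k ""))
            ((pf.getD []).foldl (fun st field =>
              (pv_clean dd).items.foldl (fun st kv =>
                if kv.1 == field && !(PySem.Set.contains st.2 kv.1) then
                  (st.1 ++ pv_row kv.1 kv.2, PySem.Set.add st.2 kv.1)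
                else st) st) ("", PySem.Set.empty)).1
        ++ "</table>" := by
    cases pf with
    | none => rfl
    | some l => cases l <;> rfl
  rw [hA, pv_prio_fold]
  have hbody : (fun (acc : String) (k : String) =>
      if PySem.Set.contains (PySem.Set.update PySem.Set.empty
          (pv_prio (pv_clean dd) (pf.getD []) PySem.Set.empty)) k then acc
      else acc ++ pv_row k ((pv_clean dd).getD k ""))
    = (fun acc k =>
      if (!(PySem.Set.contains (PySem.Set.update PySem.Set.empty
          (pv_prio (pv_clean dd) (pf.getD []) PySem.Set.empty)) k)) = true then
        acc ++ pv_row k ((pv_clean dd).getD k "") else acc) := by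
    funext acc k
    cases h : PySem.Set.contains (PySem.Set.update PySem.Set.empty
        (pv_prio (pv_clean dd) (pf.getD []) PySem.Set.empty)) k <;> simp
  show "<table class='custom-report'>"
      ++ (PySem.List.sorted (pv_clean dd).keys (fun k => k)).foldl
          (fun acc k =>
            if PySem.Set.contains (PySem.Set.update PySem.Set.empty
                (pv_prio (pv_clean dd) (pf.getD []) PySem.Set.empty)) k then acc
            else acc ++ pv_row k ((pv_clean dd).getD k ""))
          ("" ++ PySem.Str.join "" ((pv_prio (pv_clean dd) (pf.getD []) PySem.Set.empty).map
            (fun f => pv_row f ((pv_clean dd).getD f ""))))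
      ++ "</table>" = _
  rw [hbody, PySem.List.foldl_if_eq_foldl_filter, pv_foldl_append, String.empty_append]
  show _ = "<table class='custom-report'>"
      ++ PySem.Str.join "" ((PySem.List.sorted2 (pv_clean dd).keys
          (fun k => (((pf.getD []).zipIdx).foldl
              (fun d p => if d.contains p.1 then d else d.insert p.1 (p.2 : Int))
              PySem.Dict.empty).getD k ((pf.getD []).length : Int))
          (fun k => k)).map (fun k => pv_row k ((pv_clean dd).getD k "")))
      ++ "</table>"
  rw [pv_order (pv_clean dd) (pv_clean_keys_nodup dd) (pf.getD []), List.map_append, pv_join_append]
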